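-- pv_equiv track=rewrite | github.com/banillie/Portfolio_milestones | milestone_comparison_3_quarters_all.py | get_master_baseline_dict
-- ===== SOURCE A (Python) =====
-- def get_master_baseline_dict(proj_list, q_masters_dict_list, baseline_dict_list):
--     output_dict = {}
--
--     for name in proj_list:
--         master_q_list = []
--         for key in baseline_dict_list[name]:
--             for x, master in enumerate(q_masters_dict_list):
--                 try:
--                     quarter = master[name]['Reporting period (GMPP - Snapshot Date)']
--                     if quarter == key[0]:
--                         master_q_list.append(x)
--                 except KeyError:
--                     pass
--
--         output_dict[name] = master_q_list
--
--     return output_dict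
-- ===== SOURCE B (Python) =====
-- def get_master_baseline_dict(proj_list, q_masters_dict_list, baseline_dict_list):
--     QKEY = 'Reporting period (GMPP - Snapshot Date)'
--     output_dict = {}
--     for name in proj_list:
--         # one pass over the masters: quarter value -> master indices holding it, in order
--         table = {}
--         for x, master in enumerate(q_masters_dict_list):
--             try:
--                 quarter = master[name][QKEY]
--             except KeyError:
--                 continue
--             table.setdefault(quarter, []).append(x)
--         master_q_list = []
--         for key in baseline_dict_list[name]:
--             master_q_list.extend(table.get(key[0], []))
--         output_dict[name] = master_q_list
--     return output_dict
-- ===== Notes on version B (the rewrite author's own statement) =====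
-- stated objective: faster
-- what changed: Instead of rescanning all of q_masters_dict_list for every baseline key, B makes one pass per name building a dict from quarter value to the list of master indices, then answers each baseline key by a single lookup.
import Mathlib
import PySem

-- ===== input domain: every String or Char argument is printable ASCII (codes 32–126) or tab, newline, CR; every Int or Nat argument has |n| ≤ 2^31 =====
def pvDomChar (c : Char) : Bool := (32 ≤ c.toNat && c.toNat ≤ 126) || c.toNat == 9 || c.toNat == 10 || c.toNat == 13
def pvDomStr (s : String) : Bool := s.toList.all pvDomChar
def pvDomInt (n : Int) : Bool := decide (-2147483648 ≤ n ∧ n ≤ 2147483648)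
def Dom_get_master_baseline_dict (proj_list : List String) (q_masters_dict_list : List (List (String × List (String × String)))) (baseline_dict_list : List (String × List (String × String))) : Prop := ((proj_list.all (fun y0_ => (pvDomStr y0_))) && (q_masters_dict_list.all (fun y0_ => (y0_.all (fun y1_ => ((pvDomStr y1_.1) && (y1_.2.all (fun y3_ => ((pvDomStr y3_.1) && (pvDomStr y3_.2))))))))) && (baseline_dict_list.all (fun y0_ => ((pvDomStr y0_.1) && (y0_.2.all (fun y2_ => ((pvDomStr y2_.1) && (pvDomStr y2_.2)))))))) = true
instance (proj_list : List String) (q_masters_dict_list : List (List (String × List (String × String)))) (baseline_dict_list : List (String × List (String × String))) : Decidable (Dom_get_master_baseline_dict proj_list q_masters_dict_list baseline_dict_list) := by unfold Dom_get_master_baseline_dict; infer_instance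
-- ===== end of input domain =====

-- B replaces the per-baseline-key rescans of q_masters_dict_list by one quarter→indices index per name (faster); return value only, no mutation.

-- ===== PORT A =====
-- shared helper: master[name]['Reporting period (GMPP - Snapshot Date)'], none = KeyError (caught in both Pythons)
def pvQuarter (name : String) (master : List (String × List (String × String))) : Option (List Char) :=
  match (PySem.Dict.mk master).get? name with
  | some row => ((PySem.Dict.mk row).get? "Reporting period (GMPP - Snapshot Date)").map String.toList
  | none => none

def get_master_baseline_dict (proj_list : List String) (q_masters_dict_list : List (List (String × List (String × String)))) (baseline_dict_list : List (String × List (String × String))) : List (String × List Int) :=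
  (proj_list.foldl (fun (out : PySem.Dict String (List Int)) name =>
    -- 'for key in baseline_dict_list[name]' iterates a list of (quarter, value) tuples; key[0] = key.1
    let keys := (PySem.Dict.mk baseline_dict_list).getD name []
    let mql := keys.foldl (fun acc key =>
      (PySem.List.enumerate q_masters_dict_list 0).foldl (fun acc2 xm =>
        match pvQuarter name xm.2 with
        | some q => if q = key.1.toList then acc2 ++ [xm.1] else acc2
        | none => acc2) acc) []
    out.insert name mql) PySem.Dict.empty).items

-- ===== PORT B =====
def get_master_baseline_dict_alt (proj_list : List String) (q_masters_dict_list : List (List (String × List (String × String)))) (baseline_dict_list : List (String × List (String × String))) : List (String × List Int) :=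
  (proj_list.foldl (fun (out : PySem.Dict String (List Int)) name =>
    let table := (PySem.List.enumerate q_masters_dict_list 0).foldl
      (fun (t : PySem.Dict (List Char) (List Int)) xm =>
        match pvQuarter name xm.2 with
        | some q => t.modify q [] (· ++ [xm.1])
        | none => t) PySem.Dict.empty
    let keys := (PySem.Dict.mk baseline_dict_list).getD name []
    let mql := keys.foldl (fun acc key => acc ++ table.getD key.1.toList []) []
    out.insert name mql) PySem.Dict.empty).items

-- ===== PRECONDITION & SPEC =====
-- Pre_ excludes exactly the inputs where A raises: a name of proj_list missing from baseline_dict_list (KeyError).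
def Pre_get_master_baseline_dict (proj_list : List String) (q_masters_dict_list : List (List (String × List (String × String)))) (baseline_dict_list : List (String × List (String × String))) : Prop :=
  (proj_list.all (fun name => (PySem.Dict.mk baseline_dict_list).contains name)) = true
instance (proj_list : List String) (q_masters_dict_list : List (List (String × List (String × String)))) (baseline_dict_list : List (String × List (String × String))) : Decidable (Pre_get_master_baseline_dict proj_list q_masters_dict_list baseline_dict_list) := by unfold Pre_get_master_baseline_dict; infer_instance

def pvWitness_get_master_baseline_dict : List String × (List (List (String × List (String × String)))) × (List (String × List (String × String))) :=
  (["p"], [[("p", [("Reporting period (GMPP - Snapshot Date)", "Q1")])]], [("p", [("Q1", "v")])])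

def Spec_get_master_baseline_dict (proj_list : List String) (q_masters_dict_list : List (List (String × List (String × String)))) (baseline_dict_list : List (String × List (String × String))) (out : List (String × List Int)) : Prop := out = get_master_baseline_dict_alt proj_list q_masters_dict_list baseline_dict_list
instance (proj_list : List String) (q_masters_dict_list : List (List (String × List (String × String)))) (baseline_dict_list : List (String × List (String × String))) (out : List (String × List Int)) : Decidable (Spec_get_master_baseline_dict proj_list q_masters_dict_list baseline_dict_list out) := by unfold Spec_get_master_baseline_dict; infer_instance

-- ===== CLAIM (what is proved, stated in full; the proofs are below) =====
def Claim_equal_get_master_baseline_dict : Prop := ∀ (proj_list : List String) (q_masters_dict_list : List (List (String × List (String × String)))) (baseline_dict_list : List (String × List (String × String))), Dom_get_master_baseline_dict proj_list q_masters_dict_list baseline_dict_list → Pre_get_master_baseline_dict proj_list q_masters_dict_list baseline_dict_list → Spec_get_master_baseline_dict proj_list q_masters_dict_list baseline_dict_list (get_master_baseline_dict proj_list q_masters_dict_list baseline_dict_list)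

-- ===== LEMMAS AND PROOFS =====

-- the (quarter, index) pairs a name extracts from an (already enumerated) master list
def pvPairs (name : String) (l : List (Int × List (String × List (String × String)))) : List (List Char × Int) :=
  l.filterMap (fun xm => (pvQuarter name xm.2).map (fun q => (q, xm.1)))

-- A's inner scan over the masters, for a key whose first char is c
theorem a_inner_scan (name : String) (ks : List Char)
    (l : List (Int × List (String × List (String × String)))) (acc : List Int) :
    l.foldl (fun acc2 xm =>
        match pvQuarter name xm.2 with
        | some q => if q = ks then acc2 ++ [xm.1] else acc2
        | none => acc2) acc
      = acc ++ ((pvPairs name l).filter (fun p => p.1 == ks)).map (·.2) := by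
  induction l generalizing acc with
  | nil => simp [pvPairs]
  | cons xm t ih =>
    simp only [List.foldl_cons, pvPairs, List.filterMap_cons]
    cases hq : pvQuarter name xm.2 with
    | none => simpa [pvPairs] using ih acc
    | some q =>
      by_cases hc : q = ks <;>
        simp [hc, pvPairs, ih]

-- B's table build is the grouping fold over pvPairs
theorem b_table_build (name : String)
    (l : List (Int × List (String × List (String × String)))) (d : PySem.Dict (List Char) (List Int)) :
    l.foldl (fun t xm =>
        match pvQuarter name xm.2 with
        | some q => t.modify q [] (· ++ [xm.1])
        | none => t) d
      = (pvPairs name l).foldl (fun d p => d.modify p.1 [] (· ++ [p.2])) d := by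
  induction l generalizing d with
  | nil => rfl
  | cons xm t ih =>
    simp only [List.foldl_cons, pvPairs, List.filterMap_cons]
    cases hq : pvQuarter name xm.2 with
    | none => simpa [pvPairs] using ih d
    | some q => simpa [pvPairs] using ih (d.modify q [] (· ++ [xm.1]))

-- per name, the two computed index lists agree on every key list
theorem mql_eq (name : String) (q_masters_dict_list : List (List (String × List (String × String))))
    (keys : List (String × String)) (acc : List Int) :
    keys.foldl (fun acc key =>
      (PySem.List.enumerate q_masters_dict_list 0).foldl (fun acc2 xm =>
        match pvQuarter name xm.2 with
        | some q => if q = key.1.toList then acc2 ++ [xm.1] else acc2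
        | none => acc2) acc) acc
      = keys.foldl (fun acc key =>
          acc ++ ((PySem.List.enumerate q_masters_dict_list 0).foldl
              (fun (t : PySem.Dict (List Char) (List Int)) xm =>
                match pvQuarter name xm.2 with
                | some q => t.modify q [] (· ++ [xm.1])
                | none => t) PySem.Dict.empty).getD key.1.toList []) acc := by
  apply PySem.List.foldl_congr_mem
  intro acc key _
  refine (a_inner_scan name key.1.toList (PySem.List.enumerate q_masters_dict_list 0) acc).trans ?_
  rw [b_table_build, PySem.Dict.getD_foldl_modify_append, PySem.Dict.getD_empty, List.nil_append]

theorem ports_eq (proj_list : List String) (q_masters_dict_list : List (List (String × List (String × String)))) (baseline_dict_list : List (String × List (String × String))) :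
    get_master_baseline_dict proj_list q_masters_dict_list baseline_dict_list
      = get_master_baseline_dict_alt proj_list q_masters_dict_list baseline_dict_list := by
  unfold get_master_baseline_dict get_master_baseline_dict_alt
  congr 1
  apply PySem.List.foldl_congr_mem
  intro out name _
  simp only []
  congr 1
  exact mql_eq name q_masters_dict_list _ []

-- ===== VERDICT (by name: the statement is the Claim_ definition above) =====
theorem get_master_baseline_dict_spec : Claim_equal_get_master_baseline_dict := by
  intro proj_list q_masters_dict_list baseline_dict_list _ _
  unfold Spec_get_master_baseline_dict
  exact ports_eq proj_list q_masters_dict_list baseline_dict_list
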